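-- pv_equiv track=rewrite | github.com/EricPWilliamson/Codewars-algorithms | Solutions/roboscript5_cw.py | execute_raw
-- ===== SOURCE A (Python) =====
-- def execute_raw(cmds):
--     def step_forward(start, heading):
--         # Takes one step in the direction of heading:
--         if heading == 0:
--             return [start[0] + 1, start[1]]
--         elif heading == 90:
--             return [start[0], start[1] - 1]
--         elif heading == 180:
--             return [start[0] - 1, start[1]]
--         elif heading == 270:
--             return [start[0], start[1] + 1]
--
--     ###First list out the coordinates of each step, starting at (0,0)
--     coords = [[0, 0]]
--     heading = 0
--     for s in cmds:
--         if s == 'F':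
--             coords += [step_forward(coords[-1], heading)]
--         elif s == 'L':
--             heading = (heading + 90) % 360
--         elif s == 'R':
--             heading = (heading - 90) % 360
--
--     ###Then convert our coordinates to an ascii map:
--     # Find the height and width needed for our map:
--     xs = [c[0] for c in coords]
--     min_x = min(xs)
--     W = max(xs) - min_x + 1
--     ys = [c[1] for c in coords]
--     min_y = min(ys)
--     H = max(ys) - min_y + 1
--     # Initialize an empty map of " "
--     rmap = [" "] * W
--     for y in range(H - 1):
--         rmap += ["\r\n"]
--         rmap += [" "] * W
--     # For each coordinate, convert that point to a '*' on our map
--     for c in coords: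
--         x = c[0] - min_x
--         y = c[1] - min_y
--         idx = x + (W + 1) * y
--         rmap[idx] = "*"
--     return ''.join(rmap)
-- ===== SOURCE B (Python) =====
-- def execute_raw(cmds):
--     # One pass with a direction vector and a running bounding box + visited set,
--     # then render by membership test over every cell of the box.
--     x = y = 0
--     dx, dy = 1, 0
--     visited = {(0, 0)}
--     min_x = max_x = min_y = max_y = 0
--     for s in cmds:
--         if s == 'F':
--             x += dx
--             y += dy
--             visited.add((x, y))
--             if x < min_x:
--                 min_x = x
--             if x > max_x:
--                 max_x = x
--             if y < min_y:
--                 min_y = y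
--             if y > max_y:
--                 max_y = y
--         elif s == 'L':
--             dx, dy = dy, -dx
--         elif s == 'R':
--             dx, dy = -dy, dx
--     return '\r\n'.join(
--         ''.join('*' if (cx + min_x, ry + min_y) in visited else ' '
--                 for cx in range(max_x - min_x + 1))
--         for ry in range(max_y - min_y + 1))
-- ===== Notes on version B (the rewrite author's own statement) =====
-- stated objective: alternative
-- what changed: B replaces A's degree-based heading arithmetic and flat write-the-stars string buffer by a single walk pass with a direction vector, a visited set and a running bounding box, then renders the grid by a membership test over every cell joined row by row.
import Mathlib
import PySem

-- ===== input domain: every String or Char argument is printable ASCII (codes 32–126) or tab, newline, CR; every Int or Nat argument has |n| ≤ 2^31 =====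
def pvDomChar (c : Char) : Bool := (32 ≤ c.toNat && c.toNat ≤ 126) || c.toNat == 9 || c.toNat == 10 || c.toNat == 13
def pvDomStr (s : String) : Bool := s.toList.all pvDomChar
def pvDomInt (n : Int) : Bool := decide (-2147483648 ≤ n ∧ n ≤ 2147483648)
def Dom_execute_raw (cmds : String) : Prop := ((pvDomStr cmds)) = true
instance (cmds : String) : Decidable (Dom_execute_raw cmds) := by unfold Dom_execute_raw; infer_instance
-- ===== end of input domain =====

-- B replaces A's heading-in-degrees walk + flat write-the-stars buffer by a direction-vector
-- walk with a visited set and running bounding box, rendering by membership over every cell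
-- (objective: alternative decomposition, same asymptotic cost).

-- ===== PORT A =====
def pvStepForward (start : Int × Int) (heading : Int) : Option (Int × Int) :=
  if heading = 0 then some (start.1 + 1, start.2)
  else if heading = 90 then some (start.1, start.2 - 1)
  else if heading = 180 then some (start.1 - 1, start.2)
  else if heading = 270 then some (start.1, start.2 + 1)
  else none

def pvAStep (st : List (Int × Int) × Int) (s : Char) : List (Int × Int) × Int :=
  if s = 'F' then
    (st.1 ++ [(pvStepForward ((PySem.List.pyGet? st.1 (-1)).getD (0, 0)) st.2).getD (0, 0)], st.2)
  else if s = 'L' then (st.1, PySem.Int.mod (st.2 + 90) 360)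
  else if s = 'R' then (st.1, PySem.Int.mod (st.2 - 90) 360)
  else st

def execute_raw (cmds : String) : String :=
  let st := cmds.toList.foldl pvAStep ([((0 : Int), (0 : Int))], (0 : Int))
  let coords := st.1
  let xs := coords.map (fun c => c.1)
  let min_x := (PySem.List.min? xs (fun v => v)).getD 0
  let W := (PySem.List.max? xs (fun v => v)).getD 0 - min_x + 1
  let ys := coords.map (fun c => c.2)
  let min_y := (PySem.List.min? ys (fun v => v)).getD 0
  let H := (PySem.List.max? ys (fun v => v)).getD 0 - min_y + 1
  let rmap0 := PySem.List.pyRepeat [" "] W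
  let rmap1 := (PySem.List.pyRange 0 (H - 1)).foldl
      (fun acc _ => (acc ++ ["\r\n"]) ++ PySem.List.pyRepeat [" "] W) rmap0
  let rmap2 := coords.foldl
      (fun acc c => PySem.List.pySetD acc ((c.1 - min_x) + (W + 1) * (c.2 - min_y)) "*") rmap1
  PySem.Str.join "" rmap2

-- ===== PORT B =====
structure PvBState where
  x : Int
  y : Int
  dx : Int
  dy : Int
  visited : PySem.Set (Int × Int)
  min_x : Int
  max_x : Int
  min_y : Int
  max_y : Int
deriving Repr, DecidableEq

def pvBInit : PvBState := ⟨0, 0, 1, 0, PySem.Set.ofList [((0 : Int), (0 : Int))], 0, 0, 0, 0⟩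

def pvBStep (st : PvBState) (s : Char) : PvBState :=
  if s = 'F' then
    let x := st.x + st.dx
    let y := st.y + st.dy
    { st with
      x := x, y := y,
      visited := PySem.Set.add st.visited (x, y),
      min_x := if x < st.min_x then x else st.min_x,
      max_x := if x > st.max_x then x else st.max_x,
      min_y := if y < st.min_y then y else st.min_y,
      max_y := if y > st.max_y then y else st.max_y }
  else if s = 'L' then { st with dx := st.dy, dy := -st.dx }
  else if s = 'R' then { st with dx := -st.dy, dy := st.dx }
  else st

def execute_raw_alt (cmds : String) : String :=
  let st := cmds.toList.foldl pvBStep pvBInit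
  PySem.Str.join "\r\n"
    ((PySem.List.pyRange 0 (st.max_y - st.min_y + 1)).map (fun ry =>
      PySem.Str.join ""
        ((PySem.List.pyRange 0 (st.max_x - st.min_x + 1)).map (fun cx =>
          if (cx + st.min_x, ry + st.min_y) ∈ st.visited then "*" else " "))))

-- ===== PRECONDITION & SPEC =====
def Spec_execute_raw (cmds : String) (out : String) : Prop := out = execute_raw_alt cmds
instance (cmds : String) (out : String) : Decidable (Spec_execute_raw cmds out) := by unfold Spec_execute_raw; infer_instance

-- ===== CLAIM (what is proved, stated in full; the proofs are below) =====
def Claim_equal_execute_raw : Prop := ∀ (cmds : String), Dom_execute_raw cmds → Spec_execute_raw cmds (execute_raw cmds)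

-- ===== LEMMAS AND PROOFS =====

theorem pvFlatMapConst {α : Type} (B : List α) (m : Int) :
    (PySem.List.pyRange 0 m).flatMap (fun _ => B) = (List.replicate m.toNat B).flatten := by
  rw [PySem.List.pyRange_of_pos 0 m (by omega : (0:Int) < 1)]
  have h1 : (if (0:Int) < m then ((m - 0 + 1 - 1) / 1).toNat else 0) = m.toNat := by
    split_ifs <;> omega
  rw [h1, List.flatMap_map]
  induction m.toNat with
  | zero => simp
  | succ n ih => rw [List.range_succ, List.replicate_succ', List.flatMap_append, ih]; simp
theorem pvInitLen {α : Type} (w : Nat) (s sep : α) (n : Nat) :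
    (List.replicate w s ++ (List.replicate n (sep :: List.replicate w s)).flatten).length
      = w + n * (w + 1) := by
  induction n with
  | zero => simp
  | succ m ihm =>
    rw [List.replicate_succ', List.flatten_append] at *
    simp at *
    have : (m+1)*(w+1) = m*(w+1)+(w+1) := by ring
    omega

theorem pvInitGet {α : Type} (w : Nat) (s sep : α) (n : Nat) (i : Nat) (hi : i < w + n * (w + 1)) :
    (List.replicate w s ++ (List.replicate n (sep :: List.replicate w s)).flatten)[i]? =
      some (if i % (w + 1) = w then sep else s) := by
  induction n generalizing i with
  | zero =>
    simp at hi
    rw [List.getElem?_append_left (by simpa using hi)]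
    have : i % (w+1) = i := Nat.mod_eq_of_lt (by omega)
    simp [this, Nat.lt_of_lt_of_le hi (le_refl w)]
    omega
  | succ n ih =>
    have hflat : (List.replicate (n+1) (sep :: List.replicate w s)).flatten
        = (List.replicate n (sep :: List.replicate w s)).flatten ++ (sep :: List.replicate w s) := by
      rw [List.replicate_succ', List.flatten_append]; simp
    rw [hflat, ← List.append_assoc]
    have hlen := pvInitLen w s sep n
    have hring : (n+1)*(w+1) = n*(w+1)+(w+1) := by ring
    have hcomm : (w+1)*n = n*(w+1) := by ring
    have hcomm2 : (w+1)*(n+1) = n*(w+1)+(w+1) := by ring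
    by_cases hcase : i < w + n * (w+1)
    · rw [List.getElem?_append_left (by omega), ih i hcase]
    · rw [List.getElem?_append_right (by omega), hlen]
      obtain ⟨j, hjdef⟩ : ∃ j, i - (w + n * (w+1)) = j := ⟨_, rfl⟩
      rw [hjdef]
      have hjlt : j < w + 1 := by omega
      rcases Nat.eq_zero_or_pos j with hj0 | hjpos
      · have hieq : i = w + (w+1) * n := by omega
        have hmod : i % (w+1) = w := by
          rw [hieq, Nat.add_mul_mod_self_left, Nat.mod_eq_of_lt (by omega)]
        simp [hj0, hmod]
      · have hieq : i = (j-1) + (w+1) * (n+1) := by omega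
        have hmod : i % (w+1) = j - 1 := by
          rw [hieq, Nat.add_mul_mod_self_left, Nat.mod_eq_of_lt (by omega)]
        have hget : (sep :: List.replicate w s)[j]? = some s := by
          cases j with
          | zero => omega
          | succ m =>
            have hmw : m < w := by omega
            simp [hmw]
        rw [hget, hmod]
        have : ¬ (j - 1 = w) := by omega
        simp [this]

theorem pvWriteGet {κ α : Type} (coords : List κ) (I : κ → Int) (v : α)
    (init : List α) (hnn : ∀ c ∈ coords, 0 ≤ I c ∧ I c < init.length) (i : Nat) :
    (coords.foldl (fun acc c => PySem.List.pySetD acc (I c) v) init)[i]? =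
      if ∃ c ∈ coords, I c = (i : Int) then some v else init[i]? := by
  induction coords generalizing init with
  | nil => simp
  | cons c rest ih =>
    rw [List.foldl_cons]
    have hc := hnn c (by simp)
    have hset : PySem.List.pySetD init (I c) v = init.set (I c).toNat v :=
      PySem.List.pySetD_of_nonneg init v hc.1
    have hlen : (PySem.List.pySetD init (I c) v).length = init.length :=
      PySem.List.length_pySetD init (I c) v
    have hrest : ∀ c' ∈ rest, 0 ≤ I c' ∧ I c' < (PySem.List.pySetD init (I c) v).length := by
      intro c' hc'; rw [hlen]; exact hnn c' (by simp [hc'])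
    rw [ih _ hrest]
    by_cases hex : ∃ c' ∈ rest, I c' = (i : Int)
    · simp [hex]
    · by_cases hci : I c = (i : Int)
      · rw [if_neg hex, if_pos ⟨c, by simp, hci⟩, hset]
        have hieq : (I c).toNat = i := by omega
        rw [hieq]
        exact List.getElem?_set_self (by omega)
      · rw [if_neg hex, hset, List.getElem?_set_ne (by omega)]
        have : ¬ ∃ c' ∈ c :: rest, I c' = (i : Int) := by
          rintro ⟨c', hmem, hc'⟩
          rcases List.mem_cons.1 hmem with rfl | h
          · exact hci hc'
          · exact hex ⟨c', h, hc'⟩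
        rw [if_neg this]

theorem pvWriteLen {κ α : Type} (coords : List κ) (I : κ → Int) (v : α) (init : List α) :
    (coords.foldl (fun acc c => PySem.List.pySetD acc (I c) v) init).length = init.length := by
  induction coords generalizing init with
  | nil => rfl
  | cons c rest ih => rw [List.foldl_cons, ih, PySem.List.length_pySetD]

theorem pvJoinNil (ps : List (List Char)) : PySem.Chars.join [] ps = ps.flatten := by
  induction ps with
  | nil => simp [PySem.Chars.join_nil]
  | cons p t ih =>
    cases t with
    | nil => simp [PySem.Chars.join_singleton]
    | cons q r => rw [PySem.Chars.join_cons_cons, List.flatten_cons, ih]; simp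

theorem pvJoinCons (sep a : List Char) (ps : List (List Char)) (hne : ps ≠ []) :
    PySem.Chars.join sep (a :: ps) = a ++ sep ++ PySem.Chars.join sep ps := by
  cases ps with
  | nil => exact absurd rfl hne
  | cons q r => rw [PySem.Chars.join_cons_cons]

theorem pvFlattenSingletons {α β : Type} (l : List α) (f : α → β) :
    (l.map (fun x => [f x])).flatten = l.map f := by
  induction l with
  | nil => rfl
  | cons a t ih => simp [ih]

theorem pvFlatJoin (sep : List Char) (w : Nat) (h : Nat) (cell : Nat → Nat → Char) :
    PySem.Chars.join sep ((List.range (h+1)).map (fun y => (List.range w).map (cell y)))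
      = ((List.range ((h+1)*(w+1)-1)).map
          (fun i => if i % (w+1) = w then sep else [cell (i/(w+1)) (i%(w+1))])).flatten := by
  induction h generalizing cell with
  | zero =>
    have hL : (0+1)*(w+1)-1 = w := by omega
    rw [hL]
    have hmap : (List.range w).map (fun i => if i % (w+1) = w then sep else [cell (i/(w+1)) (i%(w+1))])
        = (List.range w).map (fun i => [cell 0 i]) := by
      apply List.map_congr_left
      intro i hi
      simp at hi
      have h1 : i % (w+1) = i := Nat.mod_eq_of_lt (by omega)
      have h2 : i / (w+1) = 0 := Nat.div_eq_of_lt (by omega)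
      rw [h1, h2, if_neg (by omega)]
    rw [hmap, pvFlattenSingletons]
    simp [PySem.Chars.join_singleton]
  | succ n ih =>
    -- LHS: peel the first row
    rw [List.range_succ_eq_map, List.map_cons, List.map_map,
        pvJoinCons _ _ _ (by simp)]
    have hLHS2 : ((List.range (n+1)).map ((fun y => (List.range w).map (cell y)) ∘ Nat.succ))
        = (List.range (n+1)).map (fun y => (List.range w).map (fun x => cell (y+1) x)) := by
      simp [Function.comp]
    rw [hLHS2, ih (fun y x => cell (y+1) x)]
    -- RHS: split the range
    have hL : (n+1+1)*(w+1)-1 = (w+1) + ((n+1)*(w+1)-1) := by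
      have e1 : (n+1+1)*(w+1) = n*w+n+2*w+2 := by ring
      have e2 : (n+1)*(w+1) = n*w+n+w+1 := by ring
      omega
    rw [hL, List.range_add, List.map_append, List.flatten_append]
    congr 1
    · -- first chunk = row0 ++ sep
      rw [List.range_succ, List.map_append, List.flatten_append]
      have hmap : (List.range w).map (fun i => if i % (w+1) = w then sep else [cell (i/(w+1)) (i%(w+1))])
          = (List.range w).map (fun i => [cell 0 i]) := by
        apply List.map_congr_left
        intro i hi
        simp at hi
        rw [Nat.mod_eq_of_lt (by omega), Nat.div_eq_of_lt (by omega), if_neg (by omega)]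
      rw [hmap, pvFlattenSingletons]
      simp
    · -- shifted chunk
      rw [List.map_map]
      apply congrArg
      apply List.map_congr_left
      intro i hi
      simp only [Function.comp]
      have hmod : (w+1+i) % (w+1) = i % (w+1) := Nat.add_mod_left (w+1) i
      have hdiv : (w+1+i) / (w+1) = i / (w+1) + 1 := by
        rw [Nat.add_comm (w+1) i, Nat.add_div_right i (by omega)]
      rw [hmod, hdiv]

theorem pvGetNegOne {α : Type} (l : List α) (h : l ≠ []) : PySem.List.pyGet? l (-1) = l.getLast? := by
  have hl : l.length ≠ 0 := by simpa using h
  rw [PySem.List.pyGet?, PySem.List.pyIdx?]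
  rw [if_neg (by omega), if_pos (by omega : -(l.length:Int) ≤ -1)]
  have : l.length - (-(-1:Int)).toNat = l.length - 1 := by omega
  rw [this, List.getLast?_eq_getElem?, Option.bind]

theorem pvHeadAppend {α : Type} (l t : List α) (p : α) (h : l.head? = some p) : (l ++ t).head? = some p := by
  cases l with
  | nil => simp at h
  | cons a s => simpa using h

def pvDir (h : Int) : Int × Int :=
  if h = 0 then (1, 0) else if h = 90 then (0, -1) else if h = 180 then (-1, 0) else (0, 1)

def pvInv (a : List (Int × Int) × Int) (b : PvBState) : Prop :=
  a.1.head? = some (0, 0)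
  ∧ a.1.getLast? = some (b.x, b.y)
  ∧ (a.2 = 0 ∨ a.2 = 90 ∨ a.2 = 180 ∨ a.2 = 270)
  ∧ (b.dx, b.dy) = pvDir a.2
  ∧ b.visited = PySem.Set.ofList a.1
  ∧ b.min_x = (a.1.map (fun c => c.1)).foldl min 0
  ∧ b.max_x = (a.1.map (fun c => c.1)).foldl max 0
  ∧ b.min_y = (a.1.map (fun c => c.2)).foldl min 0
  ∧ b.max_y = (a.1.map (fun c => c.2)).foldl max 0

theorem pvWalkInv (cs : List Char) :
    pvInv (cs.foldl pvAStep ([((0:Int),(0:Int))], (0:Int))) (cs.foldl pvBStep pvBInit) := by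
  induction cs using List.reverseRecOn with
  | nil =>
    refine ⟨rfl, rfl, Or.inl rfl, rfl, rfl, ?_, ?_, ?_, ?_⟩ <;> simp [pvBInit]
  | append_singleton l c ih =>
    rw [List.foldl_append, List.foldl_append, List.foldl_cons, List.foldl_nil, List.foldl_cons, List.foldl_nil]
    obtain ⟨hhead, hlast, hheads, hdir, hvis, hmnx, hmxx, hmny, hmxy⟩ := ih
    set a := l.foldl pvAStep ([((0:Int),(0:Int))], (0:Int)) with ha
    set b := l.foldl pvBStep pvBInit with hb
    have hne : a.1 ≠ [] := by
      intro hnil; rw [hnil] at hhead; simp at hhead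
    by_cases hF : c = 'F'
    · -- F case
      have hstepA : pvAStep a c =
          (a.1 ++ [(pvStepForward (b.x, b.y) a.2).getD (0,0)], a.2) := by
        rw [pvAStep, if_pos hF, pvGetNegOne a.1 hne, hlast]
        rfl
      have hnew : (pvStepForward (b.x, b.y) a.2).getD (0,0) = (b.x + b.dx, b.y + b.dy) := by
        rcases hheads with hh | hh | hh | hh <;>
          (rw [hh] at hdir ⊢; rw [pvStepForward]; simp [pvDir] at hdir ⊢; omega)
      rw [hstepA, hnew, pvBStep, if_pos hF]
      have hhead' : (a.1 ++ [(b.x + b.dx, b.y + b.dy)]).head? = some (0, 0) :=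
        pvHeadAppend _ _ _ hhead
      refine ⟨hhead', by simp, hheads, hdir, ?_, ?_, ?_, ?_, ?_⟩
      · simpa [PySem.Set.ofList_append_singleton] using congrArg (fun s => PySem.Set.add s (b.x + b.dx, b.y + b.dy)) hvis
      · simp only [List.map_append, List.foldl_append, List.map_cons, List.map_nil, List.foldl_cons, List.foldl_nil]
        rw [← hmnx, min_def]; split_ifs <;> omega
      · simp only [List.map_append, List.foldl_append, List.map_cons, List.map_nil, List.foldl_cons, List.foldl_nil]
        rw [← hmxx, max_def]; split_ifs <;> omega
      · simp only [List.map_append, List.foldl_append, List.map_cons, List.map_nil, List.foldl_cons, List.foldl_nil]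
        rw [← hmny, min_def]; split_ifs <;> omega
      · simp only [List.map_append, List.foldl_append, List.map_cons, List.map_nil, List.foldl_cons, List.foldl_nil]
        rw [← hmxy, max_def]; split_ifs <;> omega
    · by_cases hL : c = 'L'
      · have hstepA : pvAStep a c = (a.1, PySem.Int.mod (a.2 + 90) 360) := by
          rw [pvAStep, if_neg hF, if_pos hL]
        rw [hstepA, pvBStep, if_neg hF, if_pos hL]
        refine ⟨hhead, hlast, ?_, ?_, hvis, hmnx, hmxx, hmny, hmxy⟩
        · rcases hheads with hh | hh | hh | hh <;> rw [hh] <;> simp [PySem.Int.mod]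
        · rcases hheads with hh | hh | hh | hh <;>
            (rw [hh] at hdir ⊢; simp [pvDir, PySem.Int.mod] at hdir ⊢; omega)
      · by_cases hR : c = 'R'
        · have hstepA : pvAStep a c = (a.1, PySem.Int.mod (a.2 - 90) 360) := by
            rw [pvAStep, if_neg hF, if_neg hL, if_pos hR]
          rw [hstepA, pvBStep, if_neg hF, if_neg hL, if_pos hR]
          refine ⟨hhead, hlast, ?_, ?_, hvis, hmnx, hmxx, hmny, hmxy⟩
          · rcases hheads with hh | hh | hh | hh <;> rw [hh] <;> simp [PySem.Int.mod]
          · rcases hheads with hh | hh | hh | hh <;>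
              (rw [hh] at hdir ⊢; simp [pvDir, PySem.Int.mod] at hdir ⊢; omega)
        · rw [pvAStep, if_neg hF, if_neg hL, if_neg hR, pvBStep, if_neg hF, if_neg hL, if_neg hR]
          exact ⟨hhead, hlast, hheads, hdir, hvis, hmnx, hmxx, hmny, hmxy⟩


-- ===== VERDICT (by name: the statement is the Claim_ definition above) =====
theorem execute_raw_spec : Claim_equal_execute_raw := by
  intro cmds _
  unfold Spec_execute_raw
  have inv := pvWalkInv cmds.toList
  set a := cmds.toList.foldl pvAStep ([((0:Int),(0:Int))], (0:Int)) with hadef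
  set b := cmds.toList.foldl pvBStep pvBInit with hbdef
  obtain ⟨hhead, hlast, hheads, hdir, hvis, hmnx, hmxx, hmny, hmxy⟩ := inv
  obtain ⟨tl, hct⟩ : ∃ tl, a.1 = (0,0) :: tl := by
    cases hc : a.1 with
    | nil => rw [hc] at hhead; simp at hhead
    | cons p tl' =>
      rw [hc] at hhead; simp at hhead; exact ⟨tl', by rw [hhead]⟩
  set coords := a.1 with hcoords
  set mx := (coords.map (fun c => c.1)).foldl min 0 with hmx
  set Mx := (coords.map (fun c => c.1)).foldl max 0 with hMx
  set my := (coords.map (fun c => c.2)).foldl min 0 with hmy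
  set My := (coords.map (fun c => c.2)).foldl max 0 with hMy
  have hmx0 : mx ≤ 0 := (PySem.List.foldl_min_le (coords.map (fun c => c.1)) 0).1
  have hMx0 : (0:Int) ≤ Mx := (PySem.List.le_foldl_max (coords.map (fun c => c.1)) 0).1
  have hmy0 : my ≤ 0 := (PySem.List.foldl_min_le (coords.map (fun c => c.2)) 0).1
  have hMy0 : (0:Int) ≤ My := (PySem.List.le_foldl_max (coords.map (fun c => c.2)) 0).1
  have hmxle : ∀ c ∈ coords, mx ≤ c.1 := fun c hc =>
    (PySem.List.foldl_min_le (coords.map (fun c => c.1)) 0).2 _ (List.mem_map_of_mem hc)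
  have hMxge : ∀ c ∈ coords, c.1 ≤ Mx := fun c hc =>
    (PySem.List.le_foldl_max (coords.map (fun c => c.1)) 0).2 _ (List.mem_map_of_mem hc)
  have hmyle : ∀ c ∈ coords, my ≤ c.2 := fun c hc =>
    (PySem.List.foldl_min_le (coords.map (fun c => c.2)) 0).2 _ (List.mem_map_of_mem hc)
  have hMyge : ∀ c ∈ coords, c.2 ≤ My := fun c hc =>
    (PySem.List.le_foldl_max (coords.map (fun c => c.2)) 0).2 _ (List.mem_map_of_mem hc)
  set W := Mx - mx + 1 with hWdef
  set H := My - my + 1 with hHdef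
  obtain ⟨w, hWw⟩ : ∃ w : Nat, (w:Int) = W := ⟨W.toNat, by omega⟩
  obtain ⟨h, hHh⟩ : ∃ h : Nat, (h:Int) = H := ⟨H.toNat, by omega⟩
  have hw1 : 1 ≤ w := by omega
  have hh1 : 1 ≤ h := by omega
  have hxs : coords.map (fun c => c.1) = (0:Int) :: tl.map (fun c => c.1) := by rw [hct]; simp
  have hys : coords.map (fun c => c.2) = (0:Int) :: tl.map (fun c => c.2) := by rw [hct]; simp
  have hminA : (PySem.List.min? (coords.map (fun c => c.1)) (fun v => v)).getD 0 = mx := by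
    rw [hxs, PySem.List.min?_id_cons, Option.getD_some, hmx, hxs, List.foldl_cons, min_self]
  have hmaxA : (PySem.List.max? (coords.map (fun c => c.1)) (fun v => v)).getD 0 = Mx := by
    rw [hxs, PySem.List.max?_id_cons, Option.getD_some, hMx, hxs, List.foldl_cons, max_self]
  have hminAy : (PySem.List.min? (coords.map (fun c => c.2)) (fun v => v)).getD 0 = my := by
    rw [hys, PySem.List.min?_id_cons, Option.getD_some, hmy, hys, List.foldl_cons, min_self]
  have hmaxAy : (PySem.List.max? (coords.map (fun c => c.2)) (fun v => v)).getD 0 = My := by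
    rw [hys, PySem.List.max?_id_cons, Option.getD_some, hMy, hys, List.foldl_cons, max_self]
  have hB : (execute_raw_alt cmds).toList =
      PySem.Chars.join ['\r','\n'] ((List.range h).map (fun (y : Nat) => (List.range w).map
        (fun (x : Nat) => if ((x:Int) + mx, (y:Int) + my) ∈ coords then '*' else ' '))) := by
    simp only [execute_raw_alt]
    rw [← hbdef, hmxy, hmny, hmxx, hmnx, ← hHdef, ← hWdef, ← hHh, ← hWw,
        PySem.List.pyRange_zero_natCast, PySem.List.pyRange_zero_natCast]
    rw [hvis, PySem.Str.toList_join, List.map_map, List.map_map]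
    congr 1
    apply List.map_congr_left
    intro y hy
    simp only [Function.comp_def]
    rw [PySem.Str.toList_join, List.map_map, List.map_map]
    have hempty : ("" : String).toList = [] := rfl
    rw [hempty, pvJoinNil]
    simp only [Function.comp_def, PySem.Set.mem_ofList]
    have hsing : (List.range w).map
        (fun x : ℕ => (if ((x:Int) + mx, (y:Int) + my) ∈ coords then "*" else " ").toList)
        = (List.range w).map
        (fun x : ℕ => [if ((x:Int) + mx, (y:Int) + my) ∈ coords then '*' else ' ']) := by
      apply List.map_congr_left
      intro x hx
      split_ifs <;> rfl
    rw [hsing, pvFlattenSingletons]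
  -- ===== A side =====
  have hWt : W.toNat = w := by omega
  have hHt : (H - 1).toNat = h - 1 := by omega
  simp only [execute_raw]
  rw [← hadef, ← hcoords]
  rw [hminA, hmaxA, hminAy, hmaxAy, ← hWdef, ← hHdef]
  have hbody : (fun (acc : List String) (_ : Int) => acc ++ ["\r\n"] ++ PySem.List.pyRepeat [" "] W)
      = fun acc _ => acc ++ ("\r\n" :: List.replicate w " ") := by
    funext acc k
    rw [PySem.List.pyRepeat_singleton, hWt, List.append_assoc]
    rfl
  rw [hbody, PySem.List.foldl_append_eq_flatMap, pvFlatMapConst, hHt,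
      PySem.List.pyRepeat_singleton, hWt]
  have hlenInit : (List.replicate w " " ++ (List.replicate (h - 1) ("\r\n" :: List.replicate w " ")).flatten).length
      = w + (h-1) * (w+1) := pvInitLen w " " "\r\n" (h-1)
  have hcast : ((w + (h-1)*(w+1) : Nat) : Int) = W + (H-1)*(W+1) := by
    push_cast [Nat.cast_sub hh1]
    rw [hWw, hHh]
  have hIb : ∀ c ∈ coords, 0 ≤ c.1 - mx + (W + 1) * (c.2 - my) ∧
      c.1 - mx + (W + 1) * (c.2 - my) <
        ((List.replicate w " " ++ (List.replicate (h - 1) ("\r\n" :: List.replicate w " ")).flatten).length : Int) := by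
    intro c hc
    have h1 := hmxle c hc; have h2 := hMxge c hc; have h3 := hmyle c hc; have h4 := hMyge c hc
    have hmul1 : 0 ≤ (W + 1) * (c.2 - my) := mul_nonneg (by omega) (by omega)
    have hmul2 : (W + 1) * (c.2 - my) ≤ (W + 1) * (H - 1) :=
      mul_le_mul_of_nonneg_left (by omega) (by omega)
    rw [hlenInit, hcast]
    have hcomm : (H-1)*(W+1) = (W+1)*(H-1) := mul_comm _ _
    omega
  have hdec : ∀ c ∈ coords, ∀ i : Nat, c.1 - mx + (W + 1) * (c.2 - my) = (i:Int) →
      i % (w+1) < w ∧ ((Nat.cast (i % (w+1)) : Int) + mx = c.1 ∧ (Nat.cast (i / (w+1)) : Int) + my = c.2) := by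
    intro c hc i hI
    have h1 := hmxle c hc; have h2 := hMxge c hc; have h3 := hmyle c hc; have h4 := hMyge c hc
    obtain ⟨xn, hxn⟩ : ∃ xn : Nat, (xn:Int) = c.1 - mx := ⟨(c.1 - mx).toNat, by omega⟩
    obtain ⟨yn, hyn⟩ : ∃ yn : Nat, (yn:Int) = c.2 - my := ⟨(c.2 - my).toNat, by omega⟩
    have hxw : xn < w := by omega
    have hiZ : (i:Int) = ((xn + (w+1) * yn : Nat) : Int) := by
      push_cast
      rw [hxn, hyn, hWw, ← hI]
    have hiN : i = xn + (w+1) * yn := by exact_mod_cast hiZ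
    have hmod : i % (w+1) = xn := by
      rw [hiN, Nat.add_mul_mod_self_left, Nat.mod_eq_of_lt (by omega)]
    have hdiv : i / (w+1) = yn := by
      rw [hiN, Nat.add_mul_div_left _ _ (by omega : 0 < w+1), Nat.div_eq_of_lt (by omega)]
      omega
    exact ⟨by omega, by rw [hmod]; omega, by rw [hdiv]; omega⟩
  have hrmap2 : List.foldl (fun acc c => PySem.List.pySetD acc (c.1 - mx + (W + 1) * (c.2 - my)) "*")
        (List.replicate w " " ++ (List.replicate (h - 1) ("\r\n" :: List.replicate w " ")).flatten) coords
      = (List.range (w + (h-1)*(w+1))).map (fun i =>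
          if i % (w+1) = w then "\r\n"
          else if ((Nat.cast (i % (w+1)) : Int) + mx, (Nat.cast (i / (w+1)) : Int) + my) ∈ coords then "*" else " ") := by
    apply List.ext_getElem?
    intro i
    by_cases hi : i < w + (h-1)*(w+1)
    · rw [pvWriteGet coords (fun c => c.1 - mx + (W + 1) * (c.2 - my)) "*" _ hIb i]
      rw [List.getElem?_map, List.getElem?_range hi, Option.map_some]
      rw [pvInitGet w " " "\r\n" (h-1) i hi]
      by_cases hsep : i % (w + 1) = w
      · have hnoex : ¬ ∃ c ∈ coords, c.1 - mx + (W + 1) * (c.2 - my) = (i:Int) := by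
          rintro ⟨c, hc, hIc⟩
          have := (hdec c hc i hIc).1
          omega
        rw [if_neg hnoex]
        simp [hsep]
      · by_cases hmem : ((Nat.cast (i % (w+1)) : Int) + mx, (Nat.cast (i / (w+1)) : Int) + my) ∈ coords
        · have hex : ∃ c ∈ coords, c.1 - mx + (W + 1) * (c.2 - my) = (i:Int) := by
            refine ⟨_, hmem, ?_⟩
            show ((Nat.cast (i % (w+1)) : Int) + mx) - mx + (W + 1) * ((Nat.cast (i / (w+1)) : Int) + my - my) = (i:Int)
            rw [← hWw]
            have hmd := congrArg (fun n : Nat => (n : Int)) (Nat.mod_add_div i (w+1))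
            simp only [Nat.cast_add, Nat.cast_mul, Nat.cast_one] at hmd
            linear_combination hmd
          rw [if_pos hex, if_neg hsep, if_pos hmem]
        · have hnoex : ¬ ∃ c ∈ coords, c.1 - mx + (W + 1) * (c.2 - my) = (i:Int) := by
            rintro ⟨c, hc, hIc⟩
            obtain ⟨-, hcx, hcy⟩ := hdec c hc i hIc
            refine hmem ?_
            rw [hcx, hcy]
            exact hc
          rw [if_neg hnoex, if_neg hmem]
    · rw [List.getElem?_eq_none, List.getElem?_eq_none]
      · simp
        omega
      · rw [pvWriteLen coords (fun c => c.1 - mx + (W + 1) * (c.2 - my)) "*", hlenInit]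
        omega
  rw [hrmap2]
  refine String.toList_inj.mp ?_
  rw [hB, PySem.Str.toList_join]
  have hempty2 : ("" : String).toList = [] := rfl
  rw [hempty2, pvJoinNil, List.map_map]
  have hmapf : (String.toList ∘ fun i =>
      if i % (w+1) = w then "\r\n"
      else if ((Nat.cast (i % (w+1)) : Int) + mx, (Nat.cast (i / (w+1)) : Int) + my) ∈ coords then "*" else " ")
      = fun i => if i % (w+1) = w then ['\r','\n']
      else [if ((Nat.cast (i % (w+1)) : Int) + mx, (Nat.cast (i / (w+1)) : Int) + my) ∈ coords then '*' else ' '] := by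
    funext i
    simp only [Function.comp_def]
    split_ifs <;> rfl
  rw [hmapf]
  have hmul : w + 1 ≤ h * (w+1) := Nat.le_mul_of_pos_left _ (by omega)
  have hsubmul : (h-1) * (w+1) = h * (w+1) - (w+1) := by rw [Nat.sub_mul, one_mul]
  have hL2 : w + (h-1)*(w+1) = ((h-1)+1)*(w+1) - 1 := by
    have e1 : ((h-1)+1) * (w+1) = (h-1) * (w+1) + (w+1) := Nat.succ_mul _ _
    omega
  rw [hL2]
  conv_rhs => rw [show h = (h-1)+1 by omega]
  exact (pvFlatJoin ['\r','\n'] w (h-1)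
    (fun y x => if ((x:Int) + mx, (y:Int) + my) ∈ coords then '*' else ' ')).symm
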